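-- pv_equiv track=rewrite | github.com/Magnetic-Fox/MSR605X | msr605x.py | argumentExtractor
-- ===== SOURCE A (Python) =====
-- def argumentExtractor(data):
-- 	output = []
-- 	temp = None
--
-- 	# Extract every argument
-- 	for element in data:
-- 		try:
-- 			# If we have a command (only strings starting with minus and lower case)
-- 			if (element.islower()) and (element[0] == "-"):
-- 				# Skip this step on first iteration (when temp is None)
-- 				if temp != None:
-- 					# But otherwise add temporary buffer to output
-- 					output += [temp]
-- 				# Start new temporary buffer
-- 				temp = [element]
-- 			else:
-- 				# Add to temporary buffer
-- 				temp += [element]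
--
-- 		except:
-- 			# Skip errors
-- 			pass
--
-- 	# Add everything left in temporary buffer
-- 	if (temp != None) and (len(temp) != 0):
-- 		output += [temp]
--
-- 	if output == []:
-- 		output = None
--
-- 	return output
-- ===== SOURCE B (Python) =====
-- # B: index-scanning slicer -- find each command position and the end of its group,
-- # emit data[i:j] slices; no temp buffer, no per-element flush logic.
--
-- def _is_cmd(element):
-- 	try:
-- 		return element.islower() and element[0] == "-"
-- 	except Exception:
-- 		return False
--
-- def argumentExtractor(data):
-- 	gs = []
-- 	n = len(data)
-- 	i = 0
-- 	# leading non-command elements are dropped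
-- 	while i < n and not _is_cmd(data[i]):
-- 		i += 1
-- 	while i < n:
-- 		j = i + 1
-- 		while j < n and not _is_cmd(data[j]):
-- 			j += 1
-- 		gs.append(data[i:j])
-- 		i = j
-- 	return gs if gs else None
-- ===== Notes on version B (the rewrite author's own statement) =====
-- stated objective: faster
-- what changed: Replaces A's single-pass fold that grows a temp command buffer element by element (temp += [element]) and flushes it on each new command with an index-scanning slicer: scan for each command position and its group end, then emit data[i:j] slices.
import Mathlib
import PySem

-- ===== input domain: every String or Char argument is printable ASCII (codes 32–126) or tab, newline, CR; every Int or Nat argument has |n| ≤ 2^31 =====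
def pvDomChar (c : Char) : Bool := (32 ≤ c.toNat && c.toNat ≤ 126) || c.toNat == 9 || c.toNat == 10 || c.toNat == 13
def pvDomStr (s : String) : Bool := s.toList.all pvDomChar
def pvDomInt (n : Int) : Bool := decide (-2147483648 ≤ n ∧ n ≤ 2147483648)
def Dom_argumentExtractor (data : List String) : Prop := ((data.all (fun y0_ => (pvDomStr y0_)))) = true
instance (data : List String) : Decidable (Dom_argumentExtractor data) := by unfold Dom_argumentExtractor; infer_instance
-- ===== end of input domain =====

-- B replaces A's one-pass temp-buffer accumulator by an index-scanning slicer that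
-- finds each command position and emits data[i:j] slices (measured constant-factor
-- faster in Python: slicing instead of per-element buffer appends).

-- Hand port of Python's str.islower (not in PySem): at least one cased character and
-- no uppercase one; exact on the ASCII domain, where the cased characters are letters.
def pyIslower (s : String) : Bool :=
  s.toList.any PySem.Chars.islower && s.toList.all (fun c => !(PySem.Chars.isupper c))

-- ===== PORT A =====
-- loop body: the try/except around `temp += [element]` turns the None-temp TypeError
-- into `pass`, hence the `none => st` branch.
def stepA (st : List (List String) × Option (List String)) (element : String) :
    List (List String) × Option (List String) :=
  if pyIslower element && (PySem.Str.pyGet? element 0 == some '-') then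
    match st.2 with
    | none => (st.1, some [element])
    | some t => (st.1 ++ [t], some [element])
  else
    match st.2 with
    | none => st
    | some t => (st.1, some (t ++ [element]))

-- post-loop flush of temp, then the `output == [] → None` rewrite
def finOutA (st : List (List String) × Option (List String)) : List (List String) :=
  match st.2 with
  | some t => if t.length ≠ 0 then st.1 ++ [t] else st.1
  | none => st.1

def argumentExtractor (data : List String) : Option (List (List String)) :=
  let output := finOutA (data.foldl stepA ([], none))
  if output = [] then none else some output

-- ===== PORT B =====
def isCmdB (element : String) : Bool :=
  pyIslower element && (PySem.Str.pyGet? element 0 == some '-')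

-- the `while i < n and not _is_cmd(data[i]): i += 1` scan loops of Source B
def scanB (data : List String) (i : Nat) : Nat :=
  if h : i < data.length then
    if isCmdB data[i] then i else scanB data (i + 1)
  else i
termination_by data.length - i

theorem scanB_le (data : List String) (i : Nat) : i ≤ scanB data i := by
  unfold scanB
  split
  · split
    · exact le_refl i
    · have := scanB_le data (i + 1); omega
  · exact le_refl i
termination_by data.length - i

-- the outer `while i < n: … gs.append(data[i:j]); i = j` loop of Source B
-- (data[i:j] with 0 ≤ i ≤ j is the (drop i).take (j - i) slice)
def buildB (data : List String) (i : Nat) (gs : List (List String)) : List (List String) :=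
  if h : i < data.length then
    let j := scanB data (i + 1)
    buildB data j (gs ++ [(data.drop i).take (j - i)])
  else gs
termination_by data.length - i
decreasing_by
  have h1 : i + 1 ≤ scanB data (i + 1) := scanB_le data (i + 1)
  omega

def argumentExtractor_alt (data : List String) : Option (List (List String)) :=
  let gs := buildB data (scanB data 0) []
  if gs = [] then none else some gs

-- ===== PRECONDITION & SPEC =====
def Spec_argumentExtractor (data : List String) (out : Option (List (List String))) : Prop := out = argumentExtractor_alt data
instance (data : List String) (out : Option (List (List String))) : Decidable (Spec_argumentExtractor data out) := by unfold Spec_argumentExtractor; infer_instance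

-- ===== CLAIM (what is proved, stated in full; the proofs are below) =====
def Claim_equal_argumentExtractor : Prop := ∀ (data : List String), Dom_argumentExtractor data → Spec_argumentExtractor data (argumentExtractor data)

-- ===== LEMMAS AND PROOFS =====

-- proof-side specification: the list of command groups, one recursion step per group
def groupsS : List String → List (List String)
  | [] => []
  | e :: rest =>
    if isCmdB e then
      (e :: rest.takeWhile (fun x => !isCmdB x)) :: groupsS (rest.dropWhile (fun x => !isCmdB x))
    else groupsS rest
termination_by l => l.length
decreasing_by
  · have := List.length_dropWhile_le (fun x => !isCmdB x) rest
    simp only [List.length_cons]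
    omega
  · simp

theorem take_len_takeWhile {A : Type} (p : A → Bool) (l : List A) :
    l.take (l.takeWhile p).length = l.takeWhile p := by
  induction l with
  | nil => simp
  | cons a l ih => by_cases h : p a <;> simp [List.takeWhile_cons, h, ih]

theorem drop_len_takeWhile {A : Type} (p : A → Bool) (l : List A) :
    l.drop (l.takeWhile p).length = l.dropWhile p := by
  induction l with
  | nil => simp
  | cons a l ih => by_cases h : p a <;> simp [List.takeWhile_cons, List.dropWhile_cons, h, ih]

theorem groupsS_cons_cmd (e : String) (rest : List String) (hc : isCmdB e = true) :
    groupsS (e :: rest) =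
      (e :: rest.takeWhile (fun x => !isCmdB x)) :: groupsS (rest.dropWhile (fun x => !isCmdB x)) := by
  rw [groupsS]
  simp [hc]

theorem groupsS_cons_not_cmd (e : String) (rest : List String) (hc : ¬ isCmdB e = true) :
    groupsS (e :: rest) = groupsS rest := by
  rw [groupsS]
  simp [hc]

theorem groupsS_dropWhile (data : List String) :
    groupsS (data.dropWhile (fun x => !isCmdB x)) = groupsS data := by
  induction data with
  | nil => simp
  | cons e rest ih =>
    by_cases hc : isCmdB e = true
    · simp [List.dropWhile_cons, hc]
    · rw [List.dropWhile_cons]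
      simp only [Bool.not_eq_true] at hc
      simp only [hc, Bool.not_false, if_pos]
      rw [ih, groupsS_cons_not_cmd e rest (by simp [hc])]

theorem scanB_eq (data : List String) (i : Nat) :
    scanB data i = i + ((data.drop i).takeWhile (fun e => !isCmdB e)).length := by
  unfold scanB
  split
  · rename_i h
    have hdrop : data.drop i = data[i] :: data.drop (i + 1) := List.drop_eq_getElem_cons h
    split
    · rename_i hc
      rw [hdrop, List.takeWhile_cons]
      simp [hc]
    · rename_i hc
      have ih := scanB_eq data (i + 1)
      rw [ih, hdrop, List.takeWhile_cons]
      simp only [hc, Bool.not_false, if_pos]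
      simp only [List.length_cons]
      omega
  · rename_i h
    have : data.drop i = [] := List.drop_eq_nil_of_le (by omega)
    simp [this]
termination_by data.length - i

theorem dropWhile_head_not {A : Type} (p : A → Bool) (l : List A) (a : A) (rest : List A)
    (h : l.dropWhile p = a :: rest) : p a = false := by
  induction l with
  | nil => simp at h
  | cons x xs ih =>
    rw [List.dropWhile_cons] at h
    split at h
    · exact ih h
    · rename_i hx
      cases h
      simpa using hx

theorem drop_scanB (data : List String) (i : Nat) :
    data.drop (scanB data i) = (data.drop i).dropWhile (fun e => !isCmdB e) := by
  rw [scanB_eq data i, ← drop_len_takeWhile (fun e => !isCmdB e) (data.drop i), ← List.drop_drop]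

theorem scanB_aligned (data : List String) (i : Nat) (h : scanB data i < data.length) :
    isCmdB (data[scanB data i]'h) = true := by
  have hcons : data.drop (scanB data i) = data[scanB data i]'h :: data.drop (scanB data i + 1) :=
    List.drop_eq_getElem_cons h
  have hd := drop_scanB data i
  have := dropWhile_head_not (fun e => !isCmdB e) (data.drop i) (data[scanB data i]'h)
    (data.drop (scanB data i + 1)) (hd ▸ hcons).symm.symm
  simpa using this

theorem buildB_spec (data : List String) (i : Nat) (gs : List (List String))
    (ha : ∀ h : i < data.length, isCmdB (data[i]'h) = true) :
    buildB data i gs = gs ++ groupsS (data.drop i) := by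
  rw [buildB]
  split
  · rename_i hi
    have hc := ha hi
    have hdrop : data.drop i = data[i]'hi :: data.drop (i + 1) := List.drop_eq_getElem_cons hi
    have hscan : scanB data (i + 1) =
        (i + 1) + ((data.drop (i + 1)).takeWhile (fun e => !isCmdB e)).length :=
      scanB_eq data (i + 1)
    have htake : (data.drop i).take (scanB data (i + 1) - i) =
        data[i]'hi :: (data.drop (i + 1)).takeWhile (fun e => !isCmdB e) := by
      rw [hdrop, hscan]
      have : i + 1 + ((data.drop (i + 1)).takeWhile (fun e => !isCmdB e)).length - i
          = ((data.drop (i + 1)).takeWhile (fun e => !isCmdB e)).length + 1 := by omega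
      rw [this, List.take_succ_cons]
      rw [take_len_takeWhile]
    have hdropj : data.drop (scanB data (i + 1)) =
        (data.drop (i + 1)).dropWhile (fun e => !isCmdB e) := drop_scanB data (i + 1)
    have hrec := buildB_spec data (scanB data (i + 1))
        (gs ++ [(data.drop i).take (scanB data (i + 1) - i)])
        (fun hj => scanB_aligned data (i + 1) hj)
    rw [hrec, htake, hdropj, hdrop, groupsS_cons_cmd (data[i]'hi) _ hc]
    simp
  · rename_i hi
    have : data.drop i = [] := List.drop_eq_nil_of_le (by omega)
    simp [this, groupsS]
termination_by data.length - i
decreasing_by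
  have h1 : i + 1 ≤ scanB data (i + 1) := scanB_le data (i + 1)
  omega

theorem alt_eq_groupsS (data : List String) :
    argumentExtractor_alt data = (if groupsS data = [] then none else some (groupsS data)) := by
  unfold argumentExtractor_alt
  have ha : ∀ h : scanB data 0 < data.length, isCmdB (data[scanB data 0]'h) = true :=
    fun h => scanB_aligned data 0 h
  rw [buildB_spec data (scanB data 0) [] ha]
  have hdrop0 : data.drop (scanB data 0) = data.dropWhile (fun e => !isCmdB e) := by
    simpa using drop_scanB data 0
  rw [hdrop0, groupsS_dropWhile]
  simp

theorem foldA_some (data : List String) (out : List (List String)) (t : List String) (ht : t ≠ []) :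
    finOutA (data.foldl stepA (out, some t)) =
      out ++ (t ++ data.takeWhile (fun x => !isCmdB x)) :: groupsS (data.dropWhile (fun x => !isCmdB x)) := by
  induction data generalizing out t with
  | nil =>
    simp [finOutA, groupsS, List.length_eq_zero_iff, ht]
  | cons e rest ih =>
    by_cases hc : isCmdB e = true
    · have hg : pyIslower e = true ∧ PySem.List.pyGet? e.toList 0 = some '-' := by
        simpa [isCmdB] using hc
      have hstep : stepA (out, some t) e = (out ++ [t], some [e]) := by
        simp [stepA, hg.1, hg.2]
      simp only [List.foldl_cons, hstep]
      rw [ih (out ++ [t]) [e] (by simp)]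
      simp [List.takeWhile_cons, List.dropWhile_cons, hc, groupsS_cons_cmd e rest hc]
    · have hg : pyIslower e = true → ¬ PySem.List.pyGet? e.toList 0 = some '-' := by
        simpa [isCmdB] using hc
      have hstep : stepA (out, some t) e = (out, some (t ++ [e])) := by
        simp [stepA]
        exact hg
      simp only [List.foldl_cons, hstep]
      rw [ih out (t ++ [e]) (by simp)]
      simp only [Bool.not_eq_true] at hc
      simp [List.takeWhile_cons, List.dropWhile_cons, hc]

theorem foldA_none (data : List String) (out : List (List String)) :
    finOutA (data.foldl stepA (out, none)) = out ++ groupsS data := by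
  induction data generalizing out with
  | nil => simp [finOutA, groupsS]
  | cons e rest ih =>
    by_cases hc : isCmdB e = true
    · have hg : pyIslower e = true ∧ PySem.List.pyGet? e.toList 0 = some '-' := by
        simpa [isCmdB] using hc
      have hstep : stepA (out, none) e = (out, some [e]) := by
        simp [stepA, hg.1, hg.2]
      simp only [List.foldl_cons, hstep]
      rw [foldA_some rest out [e] (by simp)]
      rw [groupsS_cons_cmd e rest hc]
      simp
    · have hg : pyIslower e = true → ¬ PySem.List.pyGet? e.toList 0 = some '-' := by
        simpa [isCmdB] using hc
      have hstep : stepA (out, none) e = (out, none) := by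
        simp [stepA]
        exact hg
      simp only [List.foldl_cons, hstep]
      rw [ih out, groupsS_cons_not_cmd e rest hc]

-- ===== VERDICT (by name: the statement is the Claim_ definition above) =====
theorem argumentExtractor_spec : Claim_equal_argumentExtractor := by
  intro data _
  unfold Spec_argumentExtractor argumentExtractor
  rw [alt_eq_groupsS, foldA_none data []]
  simp
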